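-- pv_equiv track=rewrite | github.com/anhhuyalex/greenf | omit_exp.py | generate_triples
-- ===== SOURCE A (Python) =====
-- def generate_triples(N, total):
--     # List containing generated triples
--     gen = []
--
--
--     if 0 <= total <= N - 1:
--         # Generate first element
--         i, j, k = (0, 0, total)
--         while i <= total:
--             # print ("now i is", i)
--             while j <= total - i:
--                 gen.append ((i, j, k))
--                 j += 1
--                 k -= 1
--             i += 1
--             j = 0
--             k = total - i
--
--                 # pass
--
--     elif N <= total <= 2*N - 3:
--         # Generate first element
--         i, j, k = (0, total-N+1, N-1)
--         while i <= N-1: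
--             while j <= min(N-1, total - i):
--                 gen.append ((i, j, k))
--                 j += 1
--                 k -= 1
--             i += 1
--             k = min(N-1, total - i)
--             j = total - i - k
--
--
--
--     elif 2*N - 2 <= total <= 3*N - 3:
--         # Generate first element
--         i, j, k = (total - 2*N + 2, N-1, N-1)
--         while i <= N-1:
--             while j <= min(N-1, total - i):
--                 gen.append ((i, j, k))
--                 j += 1
--                 k -= 1
--             i += 1
--             k = min(N-1, total - i)
--             j = total - i - k
--
--     else:
--         raise ValueError("Not applicable k")
--
--     return gen
-- ===== SOURCE B (Python) =====
-- def generate_triples(N, total):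
--     if not (0 <= total <= 3 * N - 3):
--         raise ValueError("Not applicable k")
--
--     def compositions(m, rem):
--         # all m-tuples of values in [0, N-1] summing to rem, in lexicographic order;
--         # a value v is feasible iff the remaining m-1 parts can still reach rem-v
--         lo, hi = max(0, rem - (m - 1) * (N - 1)), min(N - 1, rem)
--         if m == 1:
--             return [(v,) for v in range(lo, hi + 1)]
--         if m == 2:
--             return [(v, rem - v) for v in range(lo, hi + 1)]
--         return [(v,) + rest for v in range(lo, hi + 1) for rest in compositions(m - 1, rem - v)]
--
--     return compositions(3, total)
-- ===== Notes on version B (the rewrite author's own statement) =====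
-- stated objective: alternative
-- what changed: Replaces A's three hand-derived analytic while-loop branches (with per-branch start states and running j/k counters) by a generic recursive enumerator of m-compositions of the total with parts in [0, N-1], instantiated at m=3: each level picks one feasible leading value and recurses on the remaining sum, with rows produced wholesale by the base cases.
import Mathlib
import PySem

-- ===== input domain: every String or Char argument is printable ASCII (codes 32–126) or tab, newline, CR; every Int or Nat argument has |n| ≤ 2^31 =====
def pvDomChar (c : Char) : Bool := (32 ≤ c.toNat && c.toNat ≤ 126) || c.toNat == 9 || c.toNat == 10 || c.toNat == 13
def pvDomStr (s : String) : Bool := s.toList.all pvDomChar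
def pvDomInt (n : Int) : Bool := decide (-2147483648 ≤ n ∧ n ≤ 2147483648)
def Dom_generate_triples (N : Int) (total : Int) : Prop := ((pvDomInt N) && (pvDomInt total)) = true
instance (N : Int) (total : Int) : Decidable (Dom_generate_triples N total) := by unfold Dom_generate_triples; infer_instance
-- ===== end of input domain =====

-- B replaces A's three hand-derived analytic while-loop branches by a generic recursive
-- enumerator of m-compositions with parts in [0, N-1], instantiated at m = 3 (objective: alternative).

-- ===== PORT A =====
-- inner 'while j <= bound: gen.append((i,j,k)); j += 1; k -= 1' (shared verbatim by all three branches)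
def pvInner (bound i j k : Int) (gen : List (Int × Int × Int)) :
    List (Int × Int × Int) × Int × Int :=
  if _h : j ≤ bound then pvInner bound i (j + 1) (k - 1) (gen ++ [(i, j, k)])
  else (gen, j, k)
termination_by (bound + 1 - j).toNat
decreasing_by omega

-- first branch's outer while loop
def pvOuter1 (total i j k : Int) (gen : List (Int × Int × Int)) : List (Int × Int × Int) :=
  if _h : i ≤ total then
    pvOuter1 total (i + 1) 0 (total - (i + 1)) (pvInner (total - i) i j k gen).1
  else gen
termination_by (total + 1 - i).toNat
decreasing_by omega

-- second and third branches' outer while loop (their Python bodies are identical; only the initial state differs)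
def pvOuter2 (N total i j k : Int) (gen : List (Int × Int × Int)) : List (Int × Int × Int) :=
  if _h : i ≤ N - 1 then
    pvOuter2 N total (i + 1)
      (total - (i + 1) - min (N - 1) (total - (i + 1)))
      (min (N - 1) (total - (i + 1)))
      (pvInner (min (N - 1) (total - i)) i j k gen).1
  else gen
termination_by (N - i).toNat
decreasing_by omega

def generate_triples (N : Int) (total : Int) : List (Int × Int × Int) :=
  if 0 ≤ total ∧ total ≤ N - 1 then
    pvOuter1 total 0 0 total []
  else if N ≤ total ∧ total ≤ 2 * N - 3 then
    pvOuter2 N total 0 (total - N + 1) (N - 1) []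
  else if 2 * N - 2 ≤ total ∧ total ≤ 3 * N - 3 then
    pvOuter2 N total (total - 2 * N + 2) (N - 1) (N - 1) []
  else []  -- Python raises ValueError here; Pre_ excludes these inputs

-- ===== PORT B =====
-- 'compositions(m, rem)': all m-tuples of values in [0, N-1] summing to rem, lexicographic;
-- Python's variadic tuples are modelled as List Int.
-- The 0-arm is a totality guard only: Python's compositions is never called with m = 0 here
-- (its recursion bottoms out at the m == 2 and m == 1 branches).
def pvComps (N : Int) : Nat → Int → List (List Int)
  | 0, _ => []
  | 1, rem =>
      (PySem.List.pyRange (max 0 (rem - ((1 : Int) - 1) * (N - 1))) (min (N - 1) rem + 1) 1).map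
        (fun v => [v])
  | 2, rem =>
      (PySem.List.pyRange (max 0 (rem - ((2 : Int) - 1) * (N - 1))) (min (N - 1) rem + 1) 1).map
        (fun v => [v, rem - v])
  | m + 3, rem =>
      (PySem.List.pyRange (max 0 (rem - (((m : Nat) : Int) + 3 - 1) * (N - 1)))
          (min (N - 1) rem + 1) 1).flatMap
        (fun v => (pvComps N (m + 2) (rem - v)).map (fun rest => v :: rest))

-- every element of compositions(3, total) has length 3, so this conversion to the
-- product type (required by the type convention for Python 3-tuples) is exact
def pvToTriple : List Int → Int × Int × Int
  | [a, b, c] => (a, b, c)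
  | _ => (0, 0, 0)

def generate_triples_alt (N : Int) (total : Int) : List (Int × Int × Int) :=
  if ¬ (0 ≤ total ∧ total ≤ 3 * N - 3) then []  -- Python raises ValueError here; Pre_ excludes these inputs
  else (pvComps N 3 total).map pvToTriple

-- ===== PRECONDITION & SPEC =====
-- Pre_ excludes exactly the inputs on which both A and B raise ValueError (total outside [0, 3N-3]).
def Pre_generate_triples (N : Int) (total : Int) : Prop :=
  0 ≤ total ∧ total ≤ 3 * N - 3
instance (N : Int) (total : Int) : Decidable (Pre_generate_triples N total) := by
  unfold Pre_generate_triples; infer_instance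

def pvWitness_generate_triples : Int × Int := (3, 4)

def Spec_generate_triples (N : Int) (total : Int) (out : List (Int × Int × Int)) : Prop :=
  out = generate_triples_alt N total
instance (N : Int) (total : Int) (out : List (Int × Int × Int)) :
    Decidable (Spec_generate_triples N total out) := by
  unfold Spec_generate_triples; infer_instance

-- ===== CLAIM (what is proved, stated in full; the proofs are below) =====
def Claim_equal_generate_triples : Prop :=
  ∀ (N : Int) (total : Int), Dom_generate_triples N total →
    Pre_generate_triples N total →
    Spec_generate_triples N total (generate_triples N total)

-- ===== LEMMAS AND PROOFS =====

-- the block of triples (i, a+t, total-i-a-t) for t = 0, …, n-1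
def pvSeg (total i a : Int) (n : Nat) : List (Int × Int × Int) :=
  (List.range n).map (fun (t : Nat) => (i, a + (t : Int), total - i - a - (t : Int)))

-- the triples contributed by row i: j from max(total-i-(N-1), 0) to min(total-i, N-1)
def pvRow (N total i : Int) : List (Int × Int × Int) :=
  pvSeg total i (max (total - i - (N - 1)) 0)
    ((min (total - i) (N - 1) + 1 - max (total - i - (N - 1)) 0).toNat)

def pvRows (N total i : Int) (n : Nat) : List (Int × Int × Int) :=
  (List.range n).flatMap (fun (t : Nat) => pvRow N total (i + (t : Int)))

lemma pvFlatMap_congr {α β : Type} (f g : α → List β) (l : List α)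
    (h : ∀ a ∈ l, f a = g a) : l.flatMap f = l.flatMap g := by
  induction l with
  | nil => rfl
  | cons x xs ih =>
    simp only [List.flatMap_cons]
    rw [h x (by simp), ih (fun a ha => h a (by simp [ha]))]

lemma pvSeg_cons (total i a : Int) (n : Nat) :
    pvSeg total i a (n + 1) = (i, a, total - i - a) :: pvSeg total i (a + 1) n := by
  simp only [pvSeg, List.range_succ_eq_map, List.map_cons, List.map_map]
  congr 1
  · norm_num
  · apply List.map_congr_left
    intro t _
    simp only [Function.comp_apply, Prod.mk.injEq]
    push_cast
    exact ⟨trivial, by ring, by ring⟩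

lemma pvRows_succ (N total i : Int) (n : Nat) :
    pvRows N total i (n + 1) = pvRow N total i ++ pvRows N total (i + 1) n := by
  simp only [pvRows, List.range_succ_eq_map, List.flatMap_cons, List.flatMap_map]
  congr 1
  · norm_num
  · apply pvFlatMap_congr
    intro t _
    congr 1
    push_cast
    ring

lemma pvRows_split (N total i : Int) (n m : Nat) :
    pvRows N total i (n + m) = pvRows N total i n ++ pvRows N total (i + (n : Int)) m := by
  simp only [pvRows, List.range_add, List.flatMap_append, List.flatMap_map]
  congr 1
  apply pvFlatMap_congr
  intro t _
  congr 1
  push_cast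
  ring

lemma pvRow_eq_nil (N total i : Int)
    (h : min (total - i) (N - 1) + 1 ≤ max (total - i - (N - 1)) 0) :
    pvRow N total i = [] := by
  have h0 : (min (total - i) (N - 1) + 1 - max (total - i - (N - 1)) 0).toNat = 0 := by omega
  rw [pvRow, h0]
  rfl

lemma pvRows_eq_nil (N total i : Int) (n : Nat)
    (h : ∀ t : Nat, t < n → pvRow N total (i + (t : Int)) = []) :
    pvRows N total i n = [] := by
  simp only [pvRows, List.flatMap_eq_nil_iff]
  intro t ht
  exact h t (List.mem_range.mp ht)

-- inner while loop, with the invariant k = total - i - j baked in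
lemma pvInner_fst (total : Int) :
    ∀ (n : Nat) (bound i j : Int) (gen : List (Int × Int × Int)),
      (bound + 1 - j).toNat = n →
      (pvInner bound i j (total - i - j) gen).1 = gen ++ pvSeg total i j n := by
  intro n
  induction n with
  | zero =>
    intro bound i j gen hn
    rw [pvInner, dif_neg (by omega)]
    simp [pvSeg]
  | succ n ih =>
    intro bound i j gen hn
    rw [pvInner, dif_pos (by omega : j ≤ bound)]
    have hk : total - i - j - 1 = total - i - (j + 1) := by ring
    rw [hk, ih bound i (j + 1) (gen ++ [(i, j, total - i - j)]) (by omega)]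
    rw [pvSeg_cons]
    simp

lemma pvOuter1_eq (N total : Int) (hNt : total ≤ N - 1) :
    ∀ (n : Nat) (i : Int) (gen : List (Int × Int × Int)), 0 ≤ i →
      (total + 1 - i).toNat = n →
      pvOuter1 total i 0 (total - i) gen = gen ++ pvRows N total i n := by
  intro n
  induction n with
  | zero =>
    intro i gen hi hn
    rw [pvOuter1, dif_neg (by omega)]
    simp [pvRows]
  | succ n ih =>
    intro i gen hi hn
    rw [pvOuter1, dif_pos (by omega : i ≤ total)]
    rw [show (pvInner (total - i) i 0 (total - i) gen).1
          = gen ++ pvSeg total i 0 ((total - i) + 1 - 0).toNat from by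
        have h := pvInner_fst total ((total - i) + 1 - 0).toNat (total - i) i 0 gen rfl
        rw [show total - i - 0 = total - i from by ring] at h
        exact h]
    rw [ih (i + 1) _ (by omega) (by omega), pvRows_succ]
    have hrow : pvRow N total i = pvSeg total i 0 ((total - i) + 1 - 0).toNat := by
      unfold pvRow
      rw [show max (total - i - (N - 1)) 0 = 0 from by omega,
          show min (total - i) (N - 1) = total - i from by omega]
    rw [hrow]
    simp

lemma pvOuter2_eq (N total : Int) :
    ∀ (n : Nat) (i : Int) (gen : List (Int × Int × Int)),
      (N - i).toNat = n →
      pvOuter2 N total i (total - i - min (N - 1) (total - i)) (min (N - 1) (total - i)) gen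
        = gen ++ pvRows N total i n := by
  intro n
  induction n with
  | zero =>
    intro i gen hn
    rw [pvOuter2, dif_neg (by omega)]
    simp [pvRows]
  | succ n ih =>
    intro i gen hn
    rw [pvOuter2, dif_pos (by omega : i ≤ N - 1)]
    set km := min (N - 1) (total - i) with hkm
    rw [show (pvInner km i (total - i - km) km gen).1
          = gen ++ pvSeg total i (total - i - km) ((km + 1 - (total - i - km)).toNat) from by
        have h := pvInner_fst total ((km + 1 - (total - i - km)).toNat) km i (total - i - km) gen rfl
        rw [show total - i - (total - i - km) = km from by ring] at h
        exact h]
    rw [ih (i + 1) _ (by omega), pvRows_succ]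
    have hrow : pvRow N total i = pvSeg total i (total - i - km) ((km + 1 - (total - i - km)).toNat) := by
      unfold pvRow
      rw [show max (total - i - (N - 1)) 0 = total - i - km from by omega]
      congr 1
      omega
    rw [hrow]
    simp

-- B's level-2 base case, converted, is exactly row i of the triangle
lemma pvRowB (N total i : Int) :
    (pvComps N 2 (total - i)).map (fun rest => pvToTriple (i :: rest)) = pvRow N total i := by
  have h2 : pvComps N 2 (total - i)
      = (PySem.List.pyRange (max 0 (total - i - ((2 : Int) - 1) * (N - 1)))
            (min (N - 1) (total - i) + 1) 1).map
          (fun v => [v, total - i - v]) := rfl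
  rw [h2, PySem.List.pyRange_one, List.map_map, List.map_map]
  unfold pvRow pvSeg
  rw [show max 0 (total - i - ((2 : Int) - 1) * (N - 1)) = max (total - i - (N - 1)) 0 from by
        omega,
      show (min (N - 1) (total - i) + 1 - max (total - i - (N - 1)) 0).toNat
          = (min (total - i) (N - 1) + 1 - max (total - i - (N - 1)) 0).toNat from by omega]
  apply List.map_congr_left
  intro t _
  simp only [Function.comp_apply, pvToTriple, Prod.mk.injEq]
  exact ⟨trivial, trivial, by ring⟩

lemma pvAltB (N total : Int) (h1 : 0 ≤ total) (h2 : total ≤ 3 * N - 3) :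
    generate_triples_alt N total = pvRows N total 0 N.toNat := by
  have hN : 1 ≤ N := by omega
  unfold generate_triples_alt
  rw [if_neg (by omega)]
  have h3 : pvComps N 3 total
      = (PySem.List.pyRange (max 0 (total - (((0 : Nat) : Int) + 3 - 1) * (N - 1)))
            (min (N - 1) total + 1) 1).flatMap
          (fun v => (pvComps N 2 (total - v)).map (fun rest => v :: rest)) := rfl
  rw [h3, show (((0 : Nat) : Int) + 3 - 1) = 2 from by norm_num]
  rw [List.map_flatMap, PySem.List.pyRange_one, List.flatMap_map]
  rw [pvFlatMap_congr _
      (fun t : Nat => pvRow N total (max 0 (total - 2 * (N - 1)) + (t : Int))) _ (by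
    intro t _
    simp only [List.map_map, Function.comp_def]
    exact pvRowB N total (max 0 (total - 2 * (N - 1)) + (t : Int)))]
  have hrows : (List.range ((min (N - 1) total + 1 - max 0 (total - 2 * (N - 1))).toNat)).flatMap
        (fun t : Nat => pvRow N total (max 0 (total - 2 * (N - 1)) + (t : Int)))
      = pvRows N total (max 0 (total - 2 * (N - 1)))
          ((min (N - 1) total + 1 - max 0 (total - 2 * (N - 1))).toNat) := rfl
  rw [hrows]
  -- pad with the empty rows below and above the clamped i-range
  rw [show N.toNat = (max 0 (total - 2 * (N - 1))).toNat
        + ((min (N - 1) total + 1 - max 0 (total - 2 * (N - 1))).toNat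
          + (N.toNat - (max 0 (total - 2 * (N - 1))).toNat
              - (min (N - 1) total + 1 - max 0 (total - 2 * (N - 1))).toNat)) from by omega]
  rw [pvRows_split, pvRows_split]
  rw [show pvRows N total 0 (max 0 (total - 2 * (N - 1))).toNat = [] from
      pvRows_eq_nil _ _ _ _ (fun t ht => pvRow_eq_nil _ _ _ (by omega))]
  rw [show pvRows N total
        (0 + (((max 0 (total - 2 * (N - 1))).toNat : Nat) : Int)
          + (((min (N - 1) total + 1 - max 0 (total - 2 * (N - 1))).toNat : Nat) : Int))
        (N.toNat - (max 0 (total - 2 * (N - 1))).toNat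
          - (min (N - 1) total + 1 - max 0 (total - 2 * (N - 1))).toNat) = [] from
      pvRows_eq_nil _ _ _ _ (fun t ht => pvRow_eq_nil _ _ _ (by omega))]
  rw [List.nil_append, List.append_nil]
  congr 1
  omega

-- ===== VERDICT (by name: the statement is the Claim_ definition above) =====
theorem generate_triples_spec : Claim_equal_generate_triples := by
  intro N total _ hpre
  obtain ⟨h1, h2⟩ := hpre
  have hN : 1 ≤ N := by omega
  unfold Spec_generate_triples
  rw [pvAltB N total h1 h2]
  unfold generate_triples
  by_cases hb1 : 0 ≤ total ∧ total ≤ N - 1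
  · rw [if_pos hb1]
    rw [show pvOuter1 total 0 0 total [] = pvOuter1 total 0 0 (total - 0) [] from by norm_num]
    rw [pvOuter1_eq N total hb1.2 (total + 1 - 0).toNat 0 [] le_rfl rfl, List.nil_append]
    have e1 : pvRows N total 0 N.toNat
        = pvRows N total 0 (total + 1 - 0).toNat
          ++ pvRows N total (0 + (((total + 1 - 0).toNat : Nat) : Int)) (N.toNat - (total + 1 - 0).toNat) := by
      rw [← pvRows_split]
      congr 1
      omega
    have e2 : pvRows N total (0 + (((total + 1 - 0).toNat : Nat) : Int)) (N.toNat - (total + 1 - 0).toNat) = [] := by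
      apply pvRows_eq_nil
      intro t ht
      apply pvRow_eq_nil
      omega
    rw [e1, e2, List.append_nil]
  · by_cases hb2 : N ≤ total ∧ total ≤ 2 * N - 3
    · rw [if_neg hb1, if_pos hb2]
      have h := pvOuter2_eq N total (N - 0).toNat 0 [] rfl
      rw [show total - 0 - min (N - 1) (total - 0) = total - N + 1 from by omega,
          show min (N - 1) (total - 0) = N - 1 from by omega, List.nil_append] at h
      rw [h]
      congr 1
      omega
    · have hb3 : 2 * N - 2 ≤ total ∧ total ≤ 3 * N - 3 := by omega
      rw [if_neg hb1, if_neg hb2, if_pos hb3]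
      have h := pvOuter2_eq N total (N - (total - 2 * N + 2)).toNat (total - 2 * N + 2) [] rfl
      rw [show total - (total - 2 * N + 2) - min (N - 1) (total - (total - 2 * N + 2)) = N - 1 from by omega,
          show min (N - 1) (total - (total - 2 * N + 2)) = N - 1 from by omega, List.nil_append] at h
      rw [h]
      have e1 : pvRows N total 0 N.toNat
          = pvRows N total 0 (total - 2 * N + 2).toNat
            ++ pvRows N total (0 + (((total - 2 * N + 2).toNat : Nat) : Int))
                (N.toNat - (total - 2 * N + 2).toNat) := by
        rw [← pvRows_split]
        congr 1
        omega
      have e2 : pvRows N total 0 (total - 2 * N + 2).toNat = [] := by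
        apply pvRows_eq_nil
        intro t ht
        apply pvRow_eq_nil
        omega
      rw [e1, e2, List.nil_append]
      congr 1
      · omega
      · omega
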